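-- pv_equiv track=rewrite | github.com/glmoritz/pandapower_tests | convergence_debugger.py | _get_downstream_buses
-- ===== SOURCE A (Python) =====
-- def _get_downstream_buses(net, trafo_lv_bus, line_adj):
--     """BFS to find all buses downstream of a trafo LV bus."""
--     visited = {trafo_lv_bus}
--     queue = [trafo_lv_bus]
--     while queue:
--         bus = queue.pop(0)
--         for neighbor in line_adj.get(bus, []):
--             if neighbor not in visited and neighbor != 0:
--                 visited.add(neighbor)
--                 queue.append(neighbor)
--     return visited
-- ===== SOURCE B (Python) =====
-- def _get_downstream_buses(net, trafo_lv_bus, line_adj):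
--     """Level-synchronous BFS: expand the whole frontier set at once, subtract
--     the already-known buses, and repeat until no new bus appears."""
--     result = {trafo_lv_bus}
--     frontier = {trafo_lv_bus}
--     while frontier:
--         reached = set()
--         for bus in frontier:
--             reached |= {n for n in line_adj.get(bus, []) if n != 0}
--         frontier = reached - result
--         result |= frontier
--     return result
-- ===== Notes on version B (the rewrite author's own statement) =====
-- stated objective: alternative
-- what changed: Replaced the single-FIFO-queue BFS (pop one bus at a time, testing each neighbor against the growing visited set) by a level-synchronous BFS that expands the whole frontier into one reached set per round, subtracts the known buses by set difference, and unions the remainder into the result.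
import Mathlib
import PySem

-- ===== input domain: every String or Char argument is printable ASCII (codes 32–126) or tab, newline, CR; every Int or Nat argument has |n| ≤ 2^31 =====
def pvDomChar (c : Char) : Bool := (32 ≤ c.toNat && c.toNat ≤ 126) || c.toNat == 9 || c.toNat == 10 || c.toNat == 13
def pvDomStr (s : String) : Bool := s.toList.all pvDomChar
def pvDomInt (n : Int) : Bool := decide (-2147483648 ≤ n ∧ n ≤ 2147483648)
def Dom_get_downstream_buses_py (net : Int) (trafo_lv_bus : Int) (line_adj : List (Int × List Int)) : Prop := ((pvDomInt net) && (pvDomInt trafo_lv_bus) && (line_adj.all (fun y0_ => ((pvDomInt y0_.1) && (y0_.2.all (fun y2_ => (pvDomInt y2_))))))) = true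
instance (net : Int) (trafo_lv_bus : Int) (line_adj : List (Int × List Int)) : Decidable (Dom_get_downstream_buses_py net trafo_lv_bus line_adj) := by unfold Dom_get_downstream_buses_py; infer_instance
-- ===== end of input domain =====

-- B replaces A's single-FIFO-queue BFS by a level-synchronous BFS over sets (alternative
-- decomposition, same cost class); both return the visited set of downstream buses.

-- ===== PORT A =====
-- one neighbor step of A's inner loop: 'if neighbor not in visited and neighbor != 0: add & enqueue'
def pvStepA (st : PySem.Set Int × List Int) (n : Int) : PySem.Set Int × List Int :=
  if ¬ PySem.Set.contains st.1 n = true ∧ n ≠ 0 then (PySem.Set.add st.1 n, st.2 ++ [n]) else st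

-- A's 'while queue:' loop; fuel bounds the number of pops (each pop is of a distinct visited
-- bus, so flatMap-length + 2 iterations always suffice; the fuel is never exhausted)
def pvBfsA (adj : PySem.Dict Int (List Int)) : Nat → PySem.Set Int → List Int → PySem.Set Int
  | 0, visited, _ => visited
  | _ + 1, visited, [] => visited
  | f + 1, visited, bus :: queue =>
      let st := (PySem.Dict.getD adj bus []).foldl pvStepA (visited, queue)
      pvBfsA adj f st.1 st.2

def get_downstream_buses_py (net : Int) (trafo_lv_bus : Int) (line_adj : List (Int × List Int)) : List Int :=
  pvBfsA (PySem.Dict.mk line_adj) ((line_adj.flatMap (fun p => p.2)).length + 2)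
    (PySem.Set.ofList [trafo_lv_bus]) [trafo_lv_bus]

-- ===== PORT B =====
-- 'reached |= {n for n in line_adj.get(bus, []) if n != 0}'
def pvExpand (adj : PySem.Dict Int (List Int)) (s : PySem.Set Int) (bus : Int) : PySem.Set Int :=
  PySem.Set.union s (PySem.Set.ofList ((PySem.Dict.getD adj bus []).filter (fun n => n ≠ 0)))

-- B's 'while frontier:' loop; one fuel unit per level (levels ≤ pops, so the same fuel suffices)
def pvBfsB (adj : PySem.Dict Int (List Int)) : Nat → PySem.Set Int → PySem.Set Int → PySem.Set Int
  | 0, result, _ => result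
  | f + 1, result, frontier =>
      if frontier.isEmpty then result
      else
        let reached := frontier.foldl (pvExpand adj) PySem.Set.empty
        let frontier' := PySem.Set.diff reached result
        pvBfsB adj f (PySem.Set.union result frontier') frontier'

def get_downstream_buses_py_alt (net : Int) (trafo_lv_bus : Int) (line_adj : List (Int × List Int)) : List Int :=
  pvBfsB (PySem.Dict.mk line_adj) ((line_adj.flatMap (fun p => p.2)).length + 2)
    (PySem.Set.ofList [trafo_lv_bus]) (PySem.Set.ofList [trafo_lv_bus])

-- ===== PRECONDITION & SPEC =====
def Spec_get_downstream_buses_py (net : Int) (trafo_lv_bus : Int) (line_adj : List (Int × List Int)) (out : List Int) : Prop := out = get_downstream_buses_py_alt net trafo_lv_bus line_adj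
instance (net : Int) (trafo_lv_bus : Int) (line_adj : List (Int × List Int)) (out : List Int) : Decidable (Spec_get_downstream_buses_py net trafo_lv_bus line_adj out) := by unfold Spec_get_downstream_buses_py; infer_instance

-- ===== CLAIM (what is proved, stated in full; the proofs are below) =====
def Claim_equal_get_downstream_buses_py : Prop := ∀ (net : Int) (trafo_lv_bus : Int) (line_adj : List (Int × List Int)), Dom_get_downstream_buses_py net trafo_lv_bus line_adj → Spec_get_downstream_buses_py net trafo_lv_bus line_adj (get_downstream_buses_py net trafo_lv_bus line_adj)

-- ===== LEMMAS AND PROOFS =====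

-- 'n != 0 and add to the reached set' — the effect of one neighbor of B's comprehension
def pvAddNZ (s : PySem.Set Int) (n : Int) : PySem.Set Int := if n ≠ 0 then PySem.Set.add s n else s

-- the new (previously unvisited) elements of a set s, in s's order
def pvNew (V s : List Int) : List Int := s.filter (fun x => !List.contains V x)

-- A's inner fold with queue q equals the same fold with empty accumulator, appended behind q
theorem pvShift (ns : List Int) : ∀ (V : PySem.Set Int) (q : List Int),
    ns.foldl pvStepA (V, q) = ((ns.foldl pvStepA (V, [])).1, q ++ (ns.foldl pvStepA (V, [])).2) := by
  induction ns with
  | nil => intro V q; simp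
  | cons n ns ih =>
    intro V q
    simp only [List.foldl_cons]
    by_cases h : ¬ PySem.Set.contains V n = true ∧ n ≠ 0
    · simp only [pvStepA, if_pos h]
      rw [ih (PySem.Set.add V n) (q ++ [n]), ih (PySem.Set.add V n) ([] ++ [n])]
      simp
    · simp only [pvStepA, if_neg h]
      exact ih V q

-- processing a whole level q of A's FIFO queue = one fold over the concatenated neighbor stream
theorem pvLevelA (adj : PySem.Dict Int (List Int)) (q : List Int) : ∀ (r : List Int) (V : PySem.Set Int) (f : Nat),
    pvBfsA adj (q.length + f) V (q ++ r)
      = pvBfsA adj f ((q.flatMap (fun b => PySem.Dict.getD adj b [])).foldl pvStepA (V, [])).1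
          (r ++ ((q.flatMap (fun b => PySem.Dict.getD adj b [])).foldl pvStepA (V, [])).2) := by
  induction q with
  | nil => intro r V f; simp
  | cons b q ih =>
    intro r V f
    have hl : (b :: q).length + f = (q.length + f) + 1 := by simp [List.length_cons]; omega
    rw [hl]
    show pvBfsA adj ((q.length + f) + 1) V (b :: (q ++ r)) = _
    rw [show pvBfsA adj ((q.length + f) + 1) V (b :: (q ++ r))
        = pvBfsA adj (q.length + f)
            (((PySem.Dict.getD adj b []).foldl pvStepA (V, q ++ r)).1)
            (((PySem.Dict.getD adj b []).foldl pvStepA (V, q ++ r)).2) from rfl]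
    rw [pvShift (PySem.Dict.getD adj b []) V (q ++ r)]
    rw [List.append_assoc, ih (r ++ ((PySem.Dict.getD adj b []).foldl pvStepA (V, [])).2) _ f]
    simp only [List.flatMap_cons, List.foldl_append]
    rw [pvShift (q.flatMap (fun b => PySem.Dict.getD adj b []))
        ((PySem.Dict.getD adj b []).foldl pvStepA (V, [])).1
        ((PySem.Dict.getD adj b []).foldl pvStepA (V, [])).2]
    simp

-- bridge: A's incremental fold over a neighbor stream = B's set accumulation, filtered by ∉ V
theorem pvBridge (ns : List Int) : ∀ (V s : List Int),
    ns.foldl pvStepA (V ++ pvNew V s, pvNew V s)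
      = (V ++ pvNew V (ns.foldl pvAddNZ s), pvNew V (ns.foldl pvAddNZ s)) := by
  induction ns with
  | nil => intro V s; rfl
  | cons n ns ih =>
    intro V s
    simp only [List.foldl_cons]
    by_cases h0 : n = 0
    · subst h0
      simp only [pvStepA, pvAddNZ]
      simp
      exact ih V s
    · by_cases hs : n ∈ s
      · have hsn : PySem.Set.add s n = s := by
          simp [PySem.Set.add, hs]
        have hcont : PySem.Set.contains (V ++ pvNew V s) n = true := by
          by_cases hv : n ∈ V
          · simp [PySem.Set.contains, hv]
          · simp [PySem.Set.contains, pvNew, List.mem_filter, hs, hv]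
        have hstep : pvStepA (V ++ pvNew V s, pvNew V s) n = (V ++ pvNew V s, pvNew V s) := by
          have hc : ¬ (¬ PySem.Set.contains (V ++ pvNew V s) n = true ∧ n ≠ 0) := fun hcn => hcn.1 hcont
          simp only [pvStepA, if_neg hc]
        have hnzs : pvAddNZ s n = s := by simp [pvAddNZ, hsn]
        rw [hstep, hnzs]
        exact ih V s
      · have hadd : PySem.Set.add s n = s ++ [n] := by
          simp [PySem.Set.add, hs]
        have hnz : pvAddNZ s n = s ++ [n] := by simp [pvAddNZ, h0, hadd]
        by_cases hv : n ∈ V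
        · have hcont : PySem.Set.contains (V ++ pvNew V s) n = true := by
            simp [PySem.Set.contains, hv]
          have hnew : pvNew V (s ++ [n]) = pvNew V s := by
            simp [pvNew, List.filter_append, hv]
          have hstep : pvStepA (V ++ pvNew V s, pvNew V s) n = (V ++ pvNew V s, pvNew V s) := by
            have hc : ¬ (¬ PySem.Set.contains (V ++ pvNew V s) n = true ∧ n ≠ 0) := fun hcn => hcn.1 hcont
            simp only [pvStepA, if_neg hc]
          rw [hstep, hnz, ← hnew]
          exact ih V (s ++ [n])
        · have hnewmem : n ∉ pvNew V s := by
            simp [pvNew, List.mem_filter, hs]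
          have hcont : PySem.Set.contains (V ++ pvNew V s) n = false := by
            simp [PySem.Set.contains, hv, hnewmem]
          have hnew : pvNew V (s ++ [n]) = pvNew V s ++ [n] := by
            simp [pvNew, List.filter_append, hv]
          have hstep : pvStepA (V ++ pvNew V s, pvNew V s) n
              = (V ++ pvNew V (s ++ [n]), pvNew V (s ++ [n])) := by
            have hc : ¬ PySem.Set.contains (V ++ pvNew V s) n = true ∧ n ≠ 0 := ⟨ne_true_of_eq_false hcont, h0⟩
            simp only [pvStepA, if_pos hc]
            have : PySem.Set.add (V ++ pvNew V s) n = (V ++ pvNew V s) ++ [n] := by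
              simp [PySem.Set.add, PySem.Set.contains, hv, hnewmem]
            rw [this, hnew]
            simp
          rw [hstep, hnz]
          exact ih V (s ++ [n])

-- adding an already-deduplicated batch = adding the raw batch (PySem.Set.add skips duplicates)
theorem pvUpdateOfFold (xs : List Int) : ∀ (s t : List Int),
    PySem.Set.update s (xs.foldl PySem.Set.add t) = PySem.Set.update (PySem.Set.update s t) xs := by
  induction xs with
  | nil => intro s t; rfl
  | cons x xs ih =>
    intro s t
    simp only [PySem.Set.update, List.foldl_cons] at ih ⊢
    by_cases hx : t.contains x = true
    · have hxm : x ∈ t := by simpa using hx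
      have h1 : PySem.Set.add t x = t := by simp [PySem.Set.add, hxm]
      have hmem : x ∈ List.foldl PySem.Set.add s t :=
        (PySem.Set.mem_update s t x).mpr (Or.inr hxm)
      have h2 : PySem.Set.add (List.foldl PySem.Set.add s t) x = List.foldl PySem.Set.add s t := by
        simp [PySem.Set.add, hmem]
      rw [h1, h2]
      exact ih s t
    · have hxm : x ∉ t := by simpa using hx
      have h1 : PySem.Set.add t x = t ++ [x] := by simp [PySem.Set.add, hxm]
      rw [h1, ih s (t ++ [x])]
      simp [List.foldl_append]

-- B's per-level accumulation = one pvAddNZ fold over the concatenated neighbor stream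
theorem pvReached (adj : PySem.Dict Int (List Int)) (q : List Int) : ∀ (s : List Int),
    q.foldl (pvExpand adj) s = (q.flatMap (fun b => PySem.Dict.getD adj b [])).foldl pvAddNZ s := by
  induction q with
  | nil => intro s; rfl
  | cons b q ih =>
    intro s
    simp only [List.foldl_cons, List.flatMap_cons, List.foldl_append]
    have h1 : pvExpand adj s b = (PySem.Dict.getD adj b []).foldl pvAddNZ s := by
      show PySem.Set.union s (PySem.Set.ofList ((PySem.Dict.getD adj b []).filter (fun n => n ≠ 0))) = _
      have h2 : PySem.Set.union s (PySem.Set.ofList ((PySem.Dict.getD adj b []).filter (fun n => n ≠ 0)))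
          = PySem.Set.update s ((PySem.Dict.getD adj b []).filter (fun n => n ≠ 0)) := by
        show PySem.Set.update s (((PySem.Dict.getD adj b []).filter (fun n => n ≠ 0)).foldl PySem.Set.add PySem.Set.empty) = _
        rw [pvUpdateOfFold]
        rfl
      rw [h2]
      show ((PySem.Dict.getD adj b []).filter (fun n => n ≠ 0)).foldl PySem.Set.add s = _
      rw [List.foldl_filter]
      have hfun : (fun (x : List Int) (y : Int) => if decide (y ≠ 0) = true then PySem.Set.add x y else x) = pvAddNZ := by
        funext x y; by_cases h : y = 0 <;> simp [pvAddNZ, h]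
      simp only [hfun]
    rw [h1, ih]

-- set union with a disjoint, duplicate-free list is plain append
theorem pvUnionAppend (l : List Int) : ∀ (s : List Int), (∀ x ∈ l, x ∉ s) → l.Nodup →
    PySem.Set.union s l = s ++ l := by
  induction l with
  | nil => intro s _ _; simp [PySem.Set.union, PySem.Set.update]
  | cons x l ih =>
    intro s hd hn
    have hx : x ∉ s := hd x (by simp)
    have hadd : PySem.Set.add s x = s ++ [x] := by
      simp [PySem.Set.add, hx]
    show PySem.Set.update s (x :: l) = s ++ (x :: l)
    simp only [PySem.Set.update, List.foldl_cons]
    have := ih (s ++ [x]) (by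
      intro y hy
      simp only [List.mem_append, List.mem_singleton]
      rintro (h | h)
      · exact hd y (by simp [hy]) h
      · subst h; exact (List.nodup_cons.mp hn).1 hy)
      (List.nodup_cons.mp hn).2
    simp only [PySem.Set.union, PySem.Set.update] at this
    rw [hadd, this]
    simp

-- membership in a pvAddNZ fold comes from the seed or the stream
theorem pvMemAddNZ (ns : List Int) : ∀ (s : List Int) (x : Int), x ∈ ns.foldl pvAddNZ s → x ∈ s ∨ x ∈ ns := by
  induction ns with
  | nil => intro s x h; exact Or.inl h
  | cons n ns ih =>
    intro s x h
    rcases ih _ _ h with h' | h'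
    · by_cases hn : n ≠ 0
      · simp only [pvAddNZ, if_pos hn] at h'
        rcases (PySem.Set.mem_update s [n] x).mp (by simpa [PySem.Set.update] using h') with h'' | h''
        · exact Or.inl h''
        · simp at h''; subst h''; exact Or.inr (by simp)
      · simp only [pvAddNZ, if_neg hn] at h'
        exact Or.inl h'
    · exact Or.inr (by simp [h'])

-- a pvAddNZ fold preserves the set invariant (no duplicates)
theorem pvNodupAddNZ (ns : List Int) : ∀ (s : List Int), s.Nodup → (ns.foldl pvAddNZ s).Nodup := by
  induction ns with
  | nil => intro s h; exact h
  | cons n ns ih =>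
    intro s h
    apply ih
    by_cases hn : n ≠ 0
    · simpa [pvAddNZ, hn] using PySem.Set.nodup_add s n h
    · simpa [pvAddNZ, hn] using h

-- any dict value is one of line_adj's right-hand lists
theorem pvGetDSub (line_adj : List (Int × List Int)) (b x : Int)
    (h : x ∈ PySem.Dict.getD (PySem.Dict.mk line_adj) b []) : x ∈ line_adj.flatMap (fun p => p.2) := by
  simp only [PySem.Dict.getD, PySem.Dict.get?] at h
  cases hf : List.find? (fun p => p.1 == b) line_adj with
  | none => rw [hf] at h; simp at h
  | some p =>
    rw [hf] at h
    simp only [Option.map_some, Option.getD_some] at h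
    exact List.mem_flatMap.mpr ⟨p, List.mem_of_find?_eq_some hf, h⟩

-- a duplicate-free list included in l is no longer than l
theorem pvLenLe (V l : List Int) (h : V.Nodup) (hs : ∀ x ∈ V, x ∈ l) : V.length ≤ l.length := by
  have h1 : V.toFinset.card = V.length := List.toFinset_card_of_nodup h
  have h2 : V.toFinset ⊆ l.toFinset := by intro x hx; simp only [List.mem_toFinset] at *; exact hs x hx
  have h3 := Finset.card_le_card h2
  have h4 := l.toFinset_card_le
  omega

-- one level of B's loop, unfolded
theorem pvBfsBStep (adj : PySem.Dict Int (List Int)) (f : Nat) (result : PySem.Set Int) (b : Int) (q : List Int) :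
    pvBfsB adj (f + 1) result (b :: q)
      = pvBfsB adj f
          (PySem.Set.union result (PySem.Set.diff ((b :: q).foldl (pvExpand adj) PySem.Set.empty) result))
          (PySem.Set.diff ((b :: q).foldl (pvExpand adj) PySem.Set.empty) result) := by
  rw [pvBfsB]
  simp

-- main simulation: from any shared state satisfying the BFS invariants and with enough fuel,
-- A's pop-one-at-a-time loop and B's level-synchronous loop return the same list
theorem pvMain (line_adj : List (Int × List Int)) (t : Int) : ∀ (m : Nat) (V q : List Int) (fA fB : Nat),
    V.Nodup → (∀ x ∈ q, x ∈ V) → (∀ x ∈ V, x ∈ t :: line_adj.flatMap (fun p => p.2)) →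
    (t :: line_adj.flatMap (fun p => p.2)).length - V.length + q.length ≤ m →
    (t :: line_adj.flatMap (fun p => p.2)).length - V.length + q.length ≤ fA →
    (t :: line_adj.flatMap (fun p => p.2)).length - V.length + q.length ≤ fB →
    pvBfsA (PySem.Dict.mk line_adj) fA V q = pvBfsB (PySem.Dict.mk line_adj) fB V q := by
  intro m
  induction m with
  | zero =>
    intro V q fA fB _ _ _ hm _ _
    have hq0 : q = [] := by
      cases q with
      | nil => rfl
      | cons a q => simp only [List.length_cons] at hm; omega
    subst hq0
    cases fA <;> cases fB <;> simp [pvBfsA, pvBfsB]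
  | succ m ih =>
    intro V q fA fB hnd hq hV hm hA hB
    cases q with
    | nil => cases fA <;> cases fB <;> simp [pvBfsA, pvBfsB]
    | cons b q' =>
      simp only [List.length_cons] at hm hA hB
      -- abbreviations
      set adj := PySem.Dict.mk line_adj with hadj
      set flat := line_adj.flatMap (fun p => p.2) with hflat
      set ns := (b :: q').flatMap (fun b => PySem.Dict.getD adj b []) with hns
      set S' := ns.foldl pvAddNZ [] with hS'
      set new := pvNew V S' with hnew
      have hKlen : (t :: flat).length = flat.length + 1 := by simp
      -- facts about new
      have hSnodup : S'.Nodup := pvNodupAddNZ ns [] (by simp)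
      have hnewnodup : new.Nodup := hSnodup.filter _
      have hnewV : ∀ x ∈ new, x ∉ V := by
        intro x hx
        have := List.mem_filter.mp hx
        simpa using this.2
      have hnewflat : ∀ x ∈ new, x ∈ flat := by
        intro x hx
        have hxS : x ∈ S' := (List.mem_filter.mp hx).1
        have hxns : x ∈ ns := by
          rcases pvMemAddNZ ns [] x hxS with h | h
          · simp at h
          · exact h
        rcases List.mem_flatMap.mp hxns with ⟨b', _, hb2⟩
        exact pvGetDSub line_adj b' x hb2
      -- A side: process the whole level
      obtain ⟨f', hfA⟩ : ∃ f', fA = (q'.length + 1) + f' := ⟨fA - (q'.length + 1), by omega⟩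
      have hAside : pvBfsA adj fA V (b :: q') = pvBfsA adj f' (V ++ new) new := by
        rw [hfA]
        have h1 := pvLevelA adj (b :: q') [] V f'
        simp only [List.append_nil, List.length_cons] at h1
        rw [h1]
        have h2 := pvBridge ns V []
        have h0 : pvNew V ([] : List Int) = [] := rfl
        rw [h0, List.append_nil] at h2
        rw [← hns, h2]
        simp only [List.nil_append]
        rw [← hS', ← hnew]
      -- B side: one level
      obtain ⟨fB', hfB⟩ : ∃ fB', fB = fB' + 1 := ⟨fB - 1, by omega⟩
      have hreach : (b :: q').foldl (pvExpand adj) PySem.Set.empty = S' := by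
        rw [pvReached adj (b :: q') PySem.Set.empty]
        rfl
      have hdiff : PySem.Set.diff S' V = new := rfl
      have hunion : PySem.Set.union V new = V ++ new :=
        pvUnionAppend new V hnewV hnewnodup
      have hBside : pvBfsB adj fB V (b :: q') = pvBfsB adj fB' (V ++ new) new := by
        rw [hfB, pvBfsBStep adj fB' V b q', hreach, hdiff, hunion]
      rw [hAside, hBside]
      -- invariants for the next level
      have hVnew : (V ++ new).Nodup := by
        rw [List.nodup_append]
        refine ⟨hnd, hnewnodup, ?_⟩
        intro a ha b hb
        exact fun heq => hnewV b hb (heq ▸ ha)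
      have hVnewlen : (V ++ new).length ≤ (t :: flat).length := by
        apply pvLenLe _ _ hVnew
        intro x hx
        rcases List.mem_append.mp hx with h | h
        · exact hV x h
        · exact List.mem_cons_of_mem t (hnewflat x h)
      have hlenapp : (V ++ new).length = V.length + new.length := List.length_append ..
      apply ih (V ++ new) new f' fB' hVnew (fun x hx => List.mem_append.mpr (Or.inr hx))
        (fun x hx => by
          rcases List.mem_append.mp hx with h | h
          · exact hV x h
          · exact List.mem_cons_of_mem t (hnewflat x h))
        (by omega) (by omega) (by omega)

-- ===== VERDICT (by name: the statement is the Claim_ definition above) =====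
theorem get_downstream_buses_py_spec : Claim_equal_get_downstream_buses_py := by
  intro net t line_adj _
  show get_downstream_buses_py net t line_adj = get_downstream_buses_py_alt net t line_adj
  unfold get_downstream_buses_py get_downstream_buses_py_alt
  have hof : PySem.Set.ofList [t] = [t] := rfl
  rw [hof]
  exact pvMain line_adj t ((line_adj.flatMap (fun p => p.2)).length + 1) [t] [t]
    ((line_adj.flatMap (fun p => p.2)).length + 2) ((line_adj.flatMap (fun p => p.2)).length + 2)
    (by simp) (by simp) (by simp)
    (by simp only [List.length_cons, List.length_nil]; omega)
    (by simp only [List.length_cons, List.length_nil]; omega)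
    (by simp only [List.length_cons, List.length_nil]; omega)
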